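-- pv_equiv track=rewrite | github.com/sage-502/team-generator | team-generator.py | balanced_team_sizes
-- ===== SOURCE A (Python) =====
-- import math
--
-- def balanced_team_sizes(n):
--
--     if n <= 5:
--         return [n]
--
--     team_count = math.ceil(n / 5)
--
--     base = n // team_count
--     remainder = n % team_count
--
--     sizes = [base] * team_count
--
--     for i in range(remainder):
--         sizes[i] += 1
--
--     return sizes
-- ===== SOURCE B (Python) =====
-- def balanced_team_sizes(n):
--     # Greedy repeated-ceiling split: each team takes ceil(remaining / teams_left).
--     if n <= 5:
--         return [n]
--     t = -(-n // 5)
--     sizes = []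
--     while t > 0:
--         s = -(-n // t)
--         sizes.append(s)
--         n -= s
--         t -= 1
--     return sizes
-- ===== Notes on version B (the rewrite author's own statement) =====
-- stated objective: alternative
-- what changed: Replaces the base/remainder decomposition with in-place increments by a greedy loop that repeatedly peels off ceil(remaining/teams_left) per team, producing the list directly with no mutation pass.
import Mathlib
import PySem

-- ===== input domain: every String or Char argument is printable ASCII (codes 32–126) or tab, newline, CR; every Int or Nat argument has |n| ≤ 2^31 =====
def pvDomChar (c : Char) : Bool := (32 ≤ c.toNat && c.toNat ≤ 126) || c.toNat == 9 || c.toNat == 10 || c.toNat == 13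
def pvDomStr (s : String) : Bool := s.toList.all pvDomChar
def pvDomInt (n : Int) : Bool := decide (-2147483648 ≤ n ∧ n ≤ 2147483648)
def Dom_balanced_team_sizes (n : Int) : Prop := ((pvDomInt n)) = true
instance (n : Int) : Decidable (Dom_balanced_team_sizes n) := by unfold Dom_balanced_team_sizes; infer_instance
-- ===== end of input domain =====

-- B replaces A's base/remainder + increment-loop construction by a greedy loop that
-- repeatedly peels off ceil(remaining/teams_left) per team (alternative decomposition, same cost).


-- ===== PORT A =====
-- math.ceil(n / 5) is ported as the exact integer ceiling -((-n) // 5): exact on Dom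
-- (|n| ≤ 2^31 is far below the 2^53 float-precision bound, and n/5 is never within a
-- rounding error of a non-attained integer, so the float ceil equals the integer ceil).
def balanced_team_sizes (n : Int) : List Int :=
  if n ≤ 5 then [n]
  else
    let team_count : Int := -(PySem.Int.floordiv (-n) 5)
    let base := PySem.Int.floordiv n team_count
    let remainder := PySem.Int.mod n team_count
    let sizes := List.replicate team_count.toNat base
    -- for i in range(remainder): sizes[i] += 1   (i always in range: remainder < team_count)
    (PySem.List.pyRange 0 remainder 1).foldl
      (fun sizes i => PySem.List.pySetD sizes i (PySem.List.pyGetD sizes i 0 + 1)) sizes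

-- ===== PORT B =====
-- while t > 0: s = -(-n // t); sizes.append(s); n -= s; t -= 1
-- ported as structural recursion on the countdown t (fuel = t.toNat).
def bt_go : Nat → Int → List Int
  | 0, _ => []
  | Nat.succ k, n =>
      let t : Int := (Nat.succ k : Nat)
      let s : Int := -(PySem.Int.floordiv (-n) t)
      s :: bt_go k (n - s)

def balanced_team_sizes_alt (n : Int) : List Int :=
  if n ≤ 5 then [n]
  else bt_go (-(PySem.Int.floordiv (-n) 5)).toNat n

-- ===== PRECONDITION & SPEC =====
def Spec_balanced_team_sizes (n : Int) (out : List Int) : Prop := out = balanced_team_sizes_alt n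
instance (n : Int) (out : List Int) : Decidable (Spec_balanced_team_sizes n out) := by unfold Spec_balanced_team_sizes; infer_instance

-- ===== CLAIM (what is proved, stated in full; the proofs are below) =====
def Claim_equal_balanced_team_sizes : Prop := ∀ (n : Int), Dom_balanced_team_sizes n → Spec_balanced_team_sizes n (balanced_team_sizes n)

-- ===== LEMMAS AND PROOFS =====

-- Integer ceiling of (base*t + r)/t for 0 ≤ r ≤ t, 0 < t.
theorem ceil_split (base r t : Int) (ht : 0 < t) (h0 : 0 ≤ r) (h1 : r ≤ t) :
    -(PySem.Int.floordiv (-(base * t + r)) t) = base + (if r = 0 then 0 else 1) := by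
  rw [PySem.Int.neg_floordiv_neg_eq_iff_of_pos ht]
  split_ifs with hr
  · subst hr; constructor <;> nlinarith
  · constructor <;> nlinarith [lt_of_le_of_ne h0 (Ne.symm hr)]

-- B's loop on n = base*k + r (0 ≤ r ≤ k) yields r teams of base+1 then k-r of base.
theorem bt_go_eq (k : Nat) : ∀ (base r : Int), 0 ≤ r → r ≤ (k : Int) →
    bt_go k (base * (k : Int) + r)
      = List.replicate r.toNat (base + 1) ++ List.replicate (k - r.toNat) base := by
  induction k with
  | zero =>
      intro base r h0 h1
      have : r = 0 := le_antisymm (by exact_mod_cast h1) h0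
      subst this
      simp [bt_go]
  | succ k ih =>
      intro base r h0 h1
      have ht : (0 : Int) < ((Nat.succ k : Nat) : Int) := by exact_mod_cast Nat.succ_pos k
      show (let t : Int := (Nat.succ k : Nat);
            let s : Int := -(PySem.Int.floordiv (-(base * ((Nat.succ k : Nat) : Int) + r)) t);
            s :: bt_go k (base * ((Nat.succ k : Nat) : Int) + r - s)) = _
      rw [show (((Nat.succ k : Nat) : Int)) = ((k : Int) + 1) by push_cast; ring] at *
      simp only []
      rw [ceil_split base r ((k : Int) + 1) (by omega) h0 h1]
      by_cases hr : r = 0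
      · subst hr
        have harg : base * ((k : Int) + 1) + 0 - (base + 0) = base * (k : Int) + 0 := by ring
        rw [if_pos rfl, harg, ih base 0 le_rfl (by exact_mod_cast Nat.zero_le k)]
        simp [List.replicate_succ]
      · have hr1 : (0 : Int) ≤ r - 1 := by omega
        have hr2 : r - 1 ≤ (k : Int) := by omega
        have harg : base * ((k : Int) + 1) + r - (base + 1) = base * (k : Int) + (r - 1) := by ring
        rw [if_neg hr, harg, ih base (r - 1) hr1 hr2]
        have hrt : r.toNat = (r - 1).toNat + 1 := by omega
        rw [hrt]
        simp [List.replicate_succ, Nat.succ_sub_succ]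

-- A's increment loop over range(r) on replicate t base yields the same split list.
theorem fold_eq (t : Nat) : ∀ (r : Nat) (base : Int), r ≤ t →
    (PySem.List.pyRange 0 (r : Int) 1).foldl
        (fun sizes i => PySem.List.pySetD sizes i (PySem.List.pyGetD sizes i 0 + 1))
        (List.replicate t base)
      = List.replicate r (base + 1) ++ List.replicate (t - r) base := by
  intro r
  induction r with
  | zero => intro base _; simp
  | succ m ih =>
      intro base hm
      have hcast : ((Nat.succ m : Nat) : Int) = (m : Int) + 1 := by push_cast; ring
      rw [hcast, PySem.List.pyRange_one_succ_right (by exact_mod_cast Nat.zero_le m),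
          List.foldl_append, ih base (by omega)]
      simp only [List.foldl_cons, List.foldl_nil]
      rw [PySem.List.pySetD_natCast, PySem.List.pyGetD_natCast]
      have hlen : (List.replicate m (base + 1)).length = m := List.length_replicate
      have hget : (List.replicate m (base + 1) ++ List.replicate (t - m) base).getD m 0 = base := by
        have h1 : 0 < t - m := by omega
        rw [List.getD, List.getElem?_append_right (by simp)]
        simp [hlen, h1]
      rw [hget, List.set_append]
      rw [if_neg (by omega)]
      have hsub : m - (List.replicate m (base + 1)).length = 0 := by simp
      rw [hsub]
      have htm : t - m = (t - Nat.succ m) + 1 := by omega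
      rw [htm, List.replicate_succ, List.set_cons_zero]
      simp [List.replicate_succ', List.append_assoc]

-- ===== VERDICT (by name: the statement is the Claim_ definition above) =====
theorem balanced_team_sizes_spec : Claim_equal_balanced_team_sizes := by
  intro n _
  unfold Spec_balanced_team_sizes balanced_team_sizes balanced_team_sizes_alt
  by_cases h5 : n ≤ 5
  · simp [h5]
  · simp only [if_neg h5]
    set t : Int := -(PySem.Int.floordiv (-n) 5) with htdef
    have hn6 : 6 ≤ n := by omega
    have ht2 : 2 ≤ t := by
      have := (PySem.Int.neg_floordiv_neg_eq_iff_of_pos (a := n) (b := 5) (q := t) (by norm_num)).mp rfl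
      nlinarith [this.1, this.2]
    have ht0 : (0 : Int) < t := by omega
    set base := PySem.Int.floordiv n t with hbase
    set r := PySem.Int.mod n t with hrdef
    have hr0 : 0 ≤ r := PySem.Int.mod_nonneg n ht0
    have hrt : r < t := PySem.Int.mod_lt n ht0
    have hsplit : n = base * t + r := by
      have := PySem.Int.floordiv_mul_add_mod n t
      rw [← hbase, ← hrdef] at this
      omega
    have hcast_t : ((t.toNat : Nat) : Int) = t := Int.toNat_of_nonneg (le_of_lt ht0)
    have hcast_r : ((r.toNat : Nat) : Int) = r := Int.toNat_of_nonneg hr0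
    -- B side
    have hB : bt_go t.toNat n
        = List.replicate r.toNat (base + 1) ++ List.replicate (t.toNat - r.toNat) base := by
      have := bt_go_eq t.toNat base r hr0 (by rw [hcast_t]; omega)
      rw [hcast_t] at this
      rw [hsplit]; exact this
    -- A side
    have hA := fold_eq t.toNat r.toNat base (by omega)
    rw [hcast_r] at hA
    rw [hA, hB]
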